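-- pv_equiv track=rewrite | github.com/ColinAlAskA/TIPE_2022 | TIPE - Polygone.py | nouveau_polygone
-- ===== SOURCE A (Python) =====
-- def ind_voisin(s,degre,n): #Renvoie l'indice du s+degré ième sommet.
--     return (s+degre)%n
--
-- def nouveau_polygone(polygone,i_d,i_f):      #Sert à simplifier l'écriture de la fonction récursive finale
--     n=len(polygone)
--     if n==3:
--         return(polygone)
--     else:
--         new_p=[]
--         i=i_d
--         while i != i_f :
--             new_p.append(polygone[i])
--             i=ind_voisin(i,1,n)
--         new_p.append(polygone[i_f])
--         return(new_p)
-- ===== SOURCE B (Python) =====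
-- def nouveau_polygone(polygone, i_d, i_f):
--     n = len(polygone)
--     if n == 3:
--         return polygone
--     d = i_d % n
--     f = i_f % n
--     if d <= f:
--         return polygone[d:f+1]
--     return polygone[d:] + polygone[:f+1]
-- ===== Notes on version B (the rewrite author's own statement) =====
-- stated objective: simpler
-- what changed: Replaces the element-by-element modular walk (while loop stepping i=(i+1)%n) by a wrap/no-wrap branch over two native list slices after normalising both indices mod n; the per-element interpreted loop disappears into C-level slicing.
-- outside the precondition, e.g. on nouveau_polygone([1, 2, 3, 4], -2, 2): A returns [3, 4, 1, 2, 3], B returns [3]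
import Mathlib
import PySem

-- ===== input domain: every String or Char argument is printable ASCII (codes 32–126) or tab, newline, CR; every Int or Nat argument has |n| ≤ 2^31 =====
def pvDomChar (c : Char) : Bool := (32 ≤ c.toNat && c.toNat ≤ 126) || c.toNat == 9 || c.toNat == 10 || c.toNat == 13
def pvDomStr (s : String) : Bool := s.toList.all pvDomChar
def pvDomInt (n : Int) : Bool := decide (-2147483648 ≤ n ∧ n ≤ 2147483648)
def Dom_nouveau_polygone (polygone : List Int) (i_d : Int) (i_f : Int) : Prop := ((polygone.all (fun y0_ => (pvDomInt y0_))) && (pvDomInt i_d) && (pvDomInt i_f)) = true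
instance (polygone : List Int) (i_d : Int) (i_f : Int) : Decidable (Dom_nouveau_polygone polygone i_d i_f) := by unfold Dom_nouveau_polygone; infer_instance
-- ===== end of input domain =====

-- B replaces A's element-by-element modular walk by a wrap/no-wrap branch over two
-- native slices after normalising both indices mod n (objective: simpler).

-- ===== PORT A =====
def ind_voisin (s : Int) (degre : Int) (n : Int) : Int := PySem.Int.mod (s + degre) n

-- the while loop of A, with fuel (A's loop terminates on every input admitted by Pre_;
-- fuel len+1 is enough there; on exhausted fuel / IndexError the accumulator is returned,
-- both unreachable under Pre_)
def nouveauLoopA (polygone : List Int) (i_f : Int) (n : Int) : Nat → Int → List Int → List Int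
  | 0, _, acc => acc
  | fuel+1, i, acc =>
    if i = i_f then acc
    else
      match PySem.List.pyGet? polygone i with
      | none => acc
      | some v => nouveauLoopA polygone i_f n fuel (ind_voisin i 1 n) (acc ++ [v])

def nouveau_polygone (polygone : List Int) (i_d : Int) (i_f : Int) : List Int :=
  if (polygone.length : Int) = 3 then polygone
  else
    nouveauLoopA polygone i_f (polygone.length : Int) (polygone.length + 1) i_d []
      ++ [(PySem.List.pyGet? polygone i_f).getD 0]

-- ===== PORT B =====
def nouveau_polygone_alt (polygone : List Int) (i_d : Int) (i_f : Int) : List Int :=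
  if (polygone.length : Int) = 3 then polygone
  else
    let d := PySem.Int.mod i_d (polygone.length : Int)
    let f := PySem.Int.mod i_f (polygone.length : Int)
    if d ≤ f then PySem.List.slice polygone (some d) (some (f + 1))
    else PySem.List.slice polygone (some d) none ++ PySem.List.slice polygone none (some (f + 1))

-- ===== PRECONDITION & SPEC =====
-- Pre_ excludes inputs where A raises IndexError (start or stop index out of [-n,n), or an
-- empty list) or loops forever (stop index never reached by the walk), and additionally the
-- defensible corner of a NEGATIVE start index whose wrapped position equals the stop index:
-- there A walks a full extra cycle (n+1 elements) while B returns the single element, both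
-- readings of a negative cyclic start being defensible.
def Pre_nouveau_polygone (polygone : List Int) (i_d : Int) (i_f : Int) : Prop :=
  (polygone.length : Int) = 3 ∨
    (1 ≤ (polygone.length : Int) ∧ -(polygone.length : Int) ≤ i_d ∧ i_d < (polygone.length : Int) ∧
      ((0 ≤ i_f ∧ i_f < (polygone.length : Int) ∧ (0 ≤ i_d ∨ i_d + (polygone.length : Int) ≠ i_f))
        ∨ i_d = i_f))
instance (polygone : List Int) (i_d : Int) (i_f : Int) : Decidable (Pre_nouveau_polygone polygone i_d i_f) := by unfold Pre_nouveau_polygone; infer_instance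

def pvWitness_nouveau_polygone : List Int × Int × Int := ([1, 2, 3, 4], 1, 3)

def Spec_nouveau_polygone (polygone : List Int) (i_d : Int) (i_f : Int) (out : List Int) : Prop := out = nouveau_polygone_alt polygone i_d i_f
instance (polygone : List Int) (i_d : Int) (i_f : Int) (out : List Int) : Decidable (Spec_nouveau_polygone polygone i_d i_f out) := by unfold Spec_nouveau_polygone; infer_instance

-- ===== CLAIM (what is proved, stated in full; the proofs are below) =====
def Claim_equal_nouveau_polygone : Prop := ∀ (polygone : List Int) (i_d : Int) (i_f : Int), Dom_nouveau_polygone polygone i_d i_f → Pre_nouveau_polygone polygone i_d i_f → Spec_nouveau_polygone polygone i_d i_f (nouveau_polygone polygone i_d i_f)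

-- ===== LEMMAS AND PROOFS =====

-- the cyclic segment from j (inclusive) to f (exclusive), both in [0, len)
def segB (p : List Int) (j f : Nat) : List Int :=
  if j ≤ f then (p.drop j).take (f - j) else p.drop j ++ p.take f

-- steps the walk takes from j to f
def distN (p : List Int) (f j : Nat) : Nat :=
  if j ≤ f then f - j else f + p.length - j

lemma mod_cast_small (a L : Int) (h0 : 0 ≤ a) (h1 : a < L) : PySem.Int.mod a L = a := by
  rw [PySem.Int.mod_eq_emod_of_pos (by omega)]
  exact Int.emod_eq_of_lt h0 h1

lemma loopA_eq (p : List Int) (f : Nat) (hf : f < p.length) :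
    ∀ (fuel : Nat) (j : Nat) (acc : List Int), j < p.length → distN p f j ≤ fuel →
      nouveauLoopA p (f : Int) (p.length : Int) fuel (j : Int) acc = acc ++ segB p j f := by
  intro fuel
  induction fuel with
  | zero =>
    intro j acc hj hd
    have hjf : j = f := by
      unfold distN at hd; split at hd <;> omega
    subst hjf
    simp [nouveauLoopA, segB]
  | succ fuel ih =>
    intro j acc hj hd
    by_cases hjf : j = f
    · subst hjf; simp [nouveauLoopA, segB]
    · have hget : PySem.List.pyGet? p (j : Int) = some (p[j]'hj) := by
        simp [PySem.List.pyGet?_natCast, List.getElem?_eq_getElem hj]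
      have hdrop : p.drop j = p[j]'hj :: p.drop (j + 1) := List.drop_eq_getElem_cons hj
      rw [nouveauLoopA, if_neg (show ¬ ((j : Int) = (f : Int)) by exact_mod_cast hjf)]
      simp only [hget]
      have hmod : ind_voisin (j : Int) 1 (p.length : Int) =
          (((j + 1) % p.length : Nat) : Int) := by
        unfold ind_voisin
        rcases Nat.lt_or_ge (j + 1) p.length with h | h
        · rw [Nat.mod_eq_of_lt h, mod_cast_small _ _ (by positivity) (by exact_mod_cast h)]
          push_cast; ring
        · have hjL : j + 1 = p.length := by omega
          have h2 : (j : Int) + 1 = (p.length : Int) := by omega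
          rw [hjL, h2, PySem.Int.mod_eq_emod_of_pos (by omega)]
          simp
      have hdist : distN p f ((j + 1) % p.length) ≤ fuel := by
        unfold distN at hd ⊢
        rcases Nat.lt_or_ge (j + 1) p.length with h1 | h1
        · rw [Nat.mod_eq_of_lt h1]
          split at hd <;> split <;> omega
        · have h2 : (j + 1) % p.length = 0 := by
            have : j + 1 = p.length := by omega
            rw [this]; simp
          rw [h2]
          split at hd <;> split <;> omega
      have hrec := ih ((j + 1) % p.length) (acc ++ [p[j]'hj]) (Nat.mod_lt _ (show 0 < p.length by omega)) hdist
      rw [hmod, hrec]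
      · rw [List.append_assoc]
        congr 1
        -- segB p j f = p[j] :: segB p ((j+1) % len) f
        rcases Nat.lt_or_ge j f with hlt | hge
        · have h1 : (j + 1) % p.length = j + 1 := Nat.mod_eq_of_lt (by omega)
          rw [h1]
          unfold segB
          rw [if_pos (show j + 1 ≤ f by omega), if_pos (show j ≤ f by omega), hdrop,
            (show f - j = (f - (j + 1)) + 1 by omega), List.take_succ_cons]
          rfl
        · have hgt : f < j := by omega
          rcases Nat.lt_or_ge (j + 1) p.length with h1 | h1
          · rw [Nat.mod_eq_of_lt h1]
            unfold segB
            rw [if_neg (show ¬ j + 1 ≤ f by omega), if_neg (show ¬ j ≤ f by omega), hdrop]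
            rfl
          · have hjL : j + 1 = p.length := by omega
            have : (j + 1) % p.length = 0 := by rw [hjL]; simp
            rw [this]
            unfold segB
            rw [if_pos (show 0 ≤ f by omega), if_neg (show ¬ j ≤ f by omega), hdrop]
            have hnil : p.drop (j + 1) = [] := List.drop_eq_nil_of_le (by omega)
            simp [hnil]

lemma coreA (p : List Int) (j f : Nat) (hj : j < p.length) (hf : f < p.length)
    (h3 : (p.length : Int) ≠ 3) :
    nouveau_polygone p (j : Int) (f : Int) = segB p j f ++ [p[f]'hf] := by
  unfold nouveau_polygone
  rw [if_neg h3]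
  rw [loopA_eq p f hf (p.length + 1) j [] hj (by unfold distN; split <;> omega)]
  have : PySem.List.pyGet? p (f : Int) = some (p[f]'hf) := by
    simp [PySem.List.pyGet?_natCast, List.getElem?_eq_getElem hf]
  simp [this]

lemma coreB (p : List Int) (j f : Nat) (hj : j < p.length) (hf : f < p.length)
    (h3 : (p.length : Int) ≠ 3) :
    nouveau_polygone_alt p (j : Int) (f : Int) = segB p j f ++ [p[f]'hf] := by
  unfold nouveau_polygone_alt
  rw [if_neg h3]
  simp only [mod_cast_small (j : Int) (p.length : Int) (by positivity) (by exact_mod_cast hj),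
    mod_cast_small (f : Int) (p.length : Int) (by positivity) (by exact_mod_cast hf)]
  have hcast : ((f : Int) + 1) = ((f + 1 : Nat) : Int) := by push_cast; ring
  have htake : p.take (f + 1) = p.take f ++ [p[f]'hf] := by
    rw [List.take_add_one, List.getElem?_eq_getElem hf]; simp
  by_cases hle : j ≤ f
  · rw [if_pos (show (j : Int) ≤ (f : Int) by exact_mod_cast hle), hcast, PySem.List.slice_natCast]
    unfold segB
    rw [if_pos hle]
    have hdt : (p.drop j).take (f + 1 - j) = (p.drop j).take (f - j) ++ [p[f]'hf] := by
      have h1 : f + 1 - j = (f - j) + 1 := by omega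
      rw [h1, List.take_succ]
      have : (p.drop j)[f - j]? = some (p[f]'hf) := by
        rw [List.getElem?_drop, List.getElem?_eq_getElem (by omega : j + (f - j) < p.length)]
        congr 1
        congr 1
        omega
      simp [this]
    rw [hdt]
  · have hgt : f < j := by omega
    rw [if_neg (show ¬ (j : Int) ≤ (f : Int) by exact_mod_cast hle), hcast,
      PySem.List.slice_from_natCast, PySem.List.slice_to_natCast]
    unfold segB
    rw [if_neg (show ¬ j ≤ f by omega), htake, List.append_assoc]

lemma loopA_neg_step (p : List Int) (i_d : Int) (i_f : Int)
    (hneg : i_d < 0) (hge : -(p.length : Int) ≤ i_d) (hne1 : i_d ≠ i_f)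
    (hne2 : ((i_d + p.length).toNat : Int) ≠ i_f) :
    ∀ (fuel : Nat) (acc : List Int),
      nouveauLoopA p i_f (p.length : Int) (fuel + 1) i_d acc =
      nouveauLoopA p i_f (p.length : Int) (fuel + 1) ((i_d + p.length).toNat : Int) acc := by
  intro fuel acc
  have hL : (0 : Int) < p.length := by omega
  have hd0 : ((i_d + p.length).toNat : Int) = i_d + p.length := by omega
  have hget1 : PySem.List.pyGet? p i_d = PySem.List.pyGet? p ((i_d + p.length).toNat : Int) := by
    simp only [PySem.List.pyGet?, PySem.List.pyIdx?]
    rw [hd0]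
    rw [if_neg (show ¬ (0 : Int) ≤ i_d by omega), if_pos (show -(p.length : Int) ≤ i_d by omega),
      if_pos (show (0 : Int) ≤ i_d + p.length by omega),
      if_pos (show i_d + (p.length : Int) < p.length by omega)]
    simp only [Option.bind_some]
    congr 1
    omega
  have hmod : ind_voisin i_d 1 (p.length : Int) =
      ind_voisin ((i_d + p.length).toNat : Int) 1 (p.length : Int) := by
    unfold ind_voisin
    rw [hd0]
    have h5 : i_d + (p.length : Int) + 1 = (i_d + 1) + (p.length : Int) * 1 := by ring
    rw [h5, PySem.Int.mod_eq_emod_of_pos hL, PySem.Int.mod_eq_emod_of_pos hL,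
      Int.add_mul_emod_self_left]
  rw [nouveauLoopA, nouveauLoopA]
  rw [if_neg hne1, if_neg hne2, hget1, hmod]

-- ===== VERDICT (by name: the statement is the Claim_ definition above) =====
theorem nouveau_polygone_spec : Claim_equal_nouveau_polygone := by
  intro p i_d i_f _ hpre
  unfold Spec_nouveau_polygone
  rcases hpre with h3 | ⟨hL, hdl, hdu, hcase⟩
  · unfold nouveau_polygone nouveau_polygone_alt
    rw [if_pos h3, if_pos h3]
  · by_cases h3 : (p.length : Int) = 3
    · unfold nouveau_polygone nouveau_polygone_alt
      rw [if_pos h3, if_pos h3]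
    rcases hcase with ⟨hf0, hfl, hd⟩ | heq
    · -- 0 ≤ i_f < len
      have hfc : i_f = ((i_f.toNat : Nat) : Int) := by omega
      have hfn : i_f.toNat < p.length := by omega
      rcases hd with hd0 | hne
      · -- 0 ≤ i_d : direct core
        have hdc : i_d = ((i_d.toNat : Nat) : Int) := by omega
        have hdn : i_d.toNat < p.length := by omega
        rw [hdc, hfc, coreA p _ _ hdn hfn h3, coreB p _ _ hdn hfn h3]
      · by_cases hd0 : 0 ≤ i_d
        · have hdc : i_d = ((i_d.toNat : Nat) : Int) := by omega
          have hdn : i_d.toNat < p.length := by omega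
          rw [hdc, hfc, coreA p _ _ hdn hfn h3, coreB p _ _ hdn hfn h3]
        · -- negative start: bridge one step, then core
          have hneg : i_d < 0 := by omega
          have hdn : (i_d + p.length).toNat < p.length := by omega
          by_cases hwrap : ((i_d + p.length).toNat : Int) = i_f
          · exact absurd (show i_d + (p.length : Int) = i_f by omega) hne
          · have hne1 : i_d ≠ i_f := by omega
            have hA : nouveau_polygone p i_d i_f =
                nouveau_polygone p (((i_d + p.length).toNat : Nat) : Int) i_f := by
              unfold nouveau_polygone
              rw [if_neg h3, if_neg h3,
                loopA_neg_step p i_d i_f hneg hdl hne1 hwrap p.length []]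
            have hB : nouveau_polygone_alt p i_d i_f =
                nouveau_polygone_alt p (((i_d + p.length).toNat : Nat) : Int) i_f := by
              unfold nouveau_polygone_alt
              rw [if_neg h3, if_neg h3]
              have hmm : PySem.Int.mod i_d (p.length : Int) =
                  PySem.Int.mod (((i_d + p.length).toNat : Nat) : Int) (p.length : Int) := by
                rw [mod_cast_small (((i_d + p.length).toNat : Nat) : Int) (p.length : Int)
                  (by omega) (by omega)]
                rw [PySem.Int.mod_eq_emod_of_pos (by omega)]
                rw [show i_d = (i_d + (p.length : Int)) + (p.length : Int) * (-1) by ring,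
                  Int.add_mul_emod_self_left,
                  Int.emod_eq_of_lt (by omega) (by omega)]
                omega
              rw [hmm]
            rw [hA, hB, hfc, coreA p _ _ hdn hfn h3, coreB p _ _ hdn hfn h3]
    · -- i_d = i_f : loop body never runs; both return the single wrapped element
      subst heq
      unfold nouveau_polygone nouveau_polygone_alt
      rw [if_neg h3, if_neg h3]
      have hloop : nouveauLoopA p i_d (p.length : Int) (p.length + 1) i_d [] = [] := by
        rw [nouveauLoopA]
        simp
      rw [hloop]
      by_cases h0 : 0 ≤ i_d
      · have hdn : i_d.toNat < p.length := by omega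
        have hmodd : PySem.Int.mod i_d (p.length : Int) = ((i_d.toNat : Nat) : Int) := by
          rw [PySem.Int.mod_eq_emod_of_pos (by omega), Int.emod_eq_of_lt h0 (by omega)]
          omega
        have hget : PySem.List.pyGet? p i_d = some (p[i_d.toNat]'hdn) := by
          simp only [PySem.List.pyGet?, PySem.List.pyIdx?]
          rw [if_pos h0, if_pos (show i_d < (p.length : Int) by omega)]
          simp only [Option.bind_some]
          exact List.getElem?_eq_getElem hdn
        rw [hget, hmodd, if_pos le_rfl]
        rw [show ((i_d.toNat : Nat) : Int) + 1 = ((i_d.toNat + 1 : Nat) : Int) by push_cast; ring,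
          PySem.List.slice_natCast]
        rw [show i_d.toNat + 1 - i_d.toNat = 1 by omega]
        simp
        rw [List.drop_eq_getElem_cons hdn]
        rfl
      · have hdn : (i_d + p.length).toNat < p.length := by omega
        have hmodd : PySem.Int.mod i_d (p.length : Int) =
            (((i_d + p.length).toNat : Nat) : Int) := by
          rw [PySem.Int.mod_eq_emod_of_pos (by omega)]
          rw [show i_d = (i_d + (p.length : Int)) + (p.length : Int) * (-1) by ring,
            Int.add_mul_emod_self_left,
            Int.emod_eq_of_lt (by omega) (by omega)]
          omega
        have hget : PySem.List.pyGet? p i_d = some (p[(i_d + p.length).toNat]'hdn) := by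
          simp only [PySem.List.pyGet?, PySem.List.pyIdx?]
          rw [if_neg h0, if_pos (show -(p.length : Int) ≤ i_d by omega)]
          simp only [Option.bind_some]
          rw [show p.length - (-i_d).toNat = (i_d + (p.length : Int)).toNat by omega]
          exact List.getElem?_eq_getElem hdn
        rw [hget, hmodd, if_pos le_rfl]
        rw [show (((i_d + p.length).toNat : Nat) : Int) + 1 =
            (((i_d + p.length).toNat + 1 : Nat) : Int) by push_cast; ring,
          PySem.List.slice_natCast]
        rw [show (i_d + p.length).toNat + 1 - (i_d + p.length).toNat = 1 by omega]
        simp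
        rw [List.drop_eq_getElem_cons hdn]
        rfl
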